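-- pv_equiv track=rewrite | github.com/jshales4/AdventOfCode | 2018/src/aoc_2018_02.py | calculate_doubles_and_triples
-- ===== SOURCE A (Python) =====
-- from typing import Tuple, Dict, List, Optional
--
-- def count_letter(word: str) -> Tuple[bool, bool]:
--     letters: Dict[str, int] = {}
--     double: bool = False
--     triple: bool = False
--     for char in word:
--         if char in letters:
--             letters[char] += 1
--         else:
--             letters[char] = 1
--     for key in letters:
--         if letters[key] == 2:
--             double = True
--         elif letters[key] == 3:
--             triple = True
--     return double, triple
--
-- def calculate_doubles_and_triples(words: List[str]) -> Tuple[int, int]: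
--     double_counts = 0
--     triple_counts = 0
--     for entry in words:
--         double, triple = count_letter(entry)
--         double_counts += double * 1
--         triple_counts += triple * 1
--     return double_counts, triple_counts
-- ===== SOURCE B (Python) =====
-- def run_lengths(word):
--     # lengths of maximal runs of equal characters in the sorted word
--     chars = sorted(word)
--     runs = []
--     i = 0
--     while i < len(chars):
--         j = i
--         while j < len(chars) and chars[j] == chars[i]:
--             j += 1
--         runs.append(j - i)
--         i = j
--     return runs
--
--
-- def calculate_doubles_and_triples(words):
--     doubles = 0
--     triples = 0
--     for word in words:
--         runs = run_lengths(word)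
--         doubles += 2 in runs
--         triples += 3 in runs
--     return doubles, triples
-- ===== Notes on version B (the rewrite author's own statement) =====
-- stated objective: alternative
-- what changed: Letter frequencies are obtained by sorting each word and scanning run lengths of equal adjacent characters (two-pointer grouping) instead of building a hash-table counter and then re-iterating its keys with flag variables.
import Mathlib
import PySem

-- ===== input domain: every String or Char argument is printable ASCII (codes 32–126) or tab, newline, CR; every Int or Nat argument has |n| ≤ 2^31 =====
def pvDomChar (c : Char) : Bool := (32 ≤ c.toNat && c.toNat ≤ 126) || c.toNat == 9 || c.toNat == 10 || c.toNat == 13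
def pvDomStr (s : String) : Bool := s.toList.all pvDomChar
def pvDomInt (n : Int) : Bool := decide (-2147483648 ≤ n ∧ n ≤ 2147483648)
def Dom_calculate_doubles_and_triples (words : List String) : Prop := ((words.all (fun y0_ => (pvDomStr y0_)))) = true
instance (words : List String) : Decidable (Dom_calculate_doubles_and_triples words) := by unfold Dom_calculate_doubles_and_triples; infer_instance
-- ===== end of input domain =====

-- B replaces the dict-counter helper by sorting each word and scanning run lengths of equal
-- adjacent characters; same results, a genuinely different (alternative) grouping algorithm.


-- ===== PORT A =====
def count_letter (word : String) : Bool × Bool :=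
  let letters : PySem.Dict Char Int :=
    word.toList.foldl
      (fun d c => if d.contains c then d.insert c (d.getD c 0 + 1) else d.insert c 1)
      PySem.Dict.empty
  letters.keys.foldl
    (fun (p : Bool × Bool) k =>
      if letters.getD k 0 = 2 then (true, p.2)
      else if letters.getD k 0 = 3 then (p.1, true)
      else p)
    (false, false)

def calculate_doubles_and_triples (words : List String) : Int × Int :=
  words.foldl
    (fun (p : Int × Int) entry =>
      let dt := count_letter entry
      (p.1 + (if dt.1 then 1 else 0), p.2 + (if dt.2 then 1 else 0)))
    (0, 0)

-- ===== PORT B =====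
-- the inner two-pointer scan of Source B's run_lengths: each step consumes one maximal run
def pvRuns : List Char → List Int
  | [] => []
  | a :: t => (((t.takeWhile (· == a)).length : Int) + 1) :: pvRuns (t.dropWhile (· == a))
termination_by l => l.length
decreasing_by
  simp only [List.length_cons]
  exact Nat.lt_succ_of_le (List.length_dropWhile_le _ _)

def run_lengths (word : String) : List Int :=
  pvRuns (PySem.List.sorted word.toList (fun c => c) false)

def calculate_doubles_and_triples_alt (words : List String) : Int × Int :=
  words.foldl
    (fun (p : Int × Int) word =>
      let runs := run_lengths word
      (p.1 + (if (2 : Int) ∈ runs then 1 else 0), p.2 + (if (3 : Int) ∈ runs then 1 else 0)))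
    (0, 0)

-- ===== PRECONDITION & SPEC =====
def Spec_calculate_doubles_and_triples (words : List String) (out : Int × Int) : Prop := out = calculate_doubles_and_triples_alt words
instance (words : List String) (out : Int × Int) : Decidable (Spec_calculate_doubles_and_triples words out) := by unfold Spec_calculate_doubles_and_triples; infer_instance

-- ===== CLAIM (what is proved, stated in full; the proofs are below) =====
def Claim_equal_calculate_doubles_and_triples : Prop := ∀ (words : List String), Dom_calculate_doubles_and_triples words → Spec_calculate_doubles_and_triples words (calculate_doubles_and_triples words)

-- ===== LEMMAS AND PROOFS =====

-- A's counting loop is the standard counter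
theorem pv_counter_eq (xs : List Char) :
    xs.foldl (fun d c => if d.contains c then d.insert c (d.getD c 0 + 1) else d.insert c 1)
      PySem.Dict.empty = PySem.Dict.counter xs := by
  have hf : (fun (d : PySem.Dict Char Int) c =>
      if d.contains c then d.insert c (d.getD c 0 + 1) else d.insert c 1)
      = (fun d c => d.insert c (d.getD c 0 + 1)) := by
    funext d c
    by_cases h : d.contains c
    · simp [h]
    · have hc : d.contains c = false := by simpa using h
      simp [h, PySem.Dict.getD_of_not_contains]
  rw [hf, PySem.Dict.foldl_insert_getD_add_one_eq_counter]

-- A's flag loop sets each flag iff some key satisfies its test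
theorem pv_flag_fold (g : Char → Int) (ks : List Char) (d t : Bool) :
    ks.foldl (fun (p : Bool × Bool) k =>
        if g k = 2 then (true, p.2) else if g k = 3 then (p.1, true) else p) (d, t)
    = (d || ks.any (fun k => g k == 2), t || ks.any (fun k => g k == 3)) := by
  induction ks generalizing d t with
  | nil => simp
  | cons k ks ih =>
    simp only [List.foldl_cons, List.any_cons]
    by_cases h2 : g k = 2
    · have h3 : ¬ g k = 3 := by omega
      have b2 : (g k == 2) = true := beq_iff_eq.mpr h2
      have b3 : (g k == 3) = false := beq_eq_false_iff_ne.mpr h3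
      rw [if_pos h2, ih]
      simp [b2, b3]
    · have b2 : (g k == 2) = false := beq_eq_false_iff_ne.mpr h2
      by_cases h3 : g k = 3
      · have b3 : (g k == 3) = true := beq_iff_eq.mpr h3
        rw [if_neg h2, if_pos h3, ih]
        simp [b2, b3]
      · have b3 : (g k == 3) = false := beq_eq_false_iff_ne.mpr h3
        rw [if_neg h2, if_neg h3, ih]
        simp [b2, b3]

-- membership in B's run lengths of a sorted list = some character count
theorem pv_runs_mem : ∀ (l : List Char), l.Pairwise (· ≤ ·) →
    ∀ n : Int, (n ∈ pvRuns l ↔ ∃ c ∈ l, (l.count c : Int) = n) := by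
  intro l
  induction l using pvRuns.induct with
  | case1 => intro _ n; simp [pvRuns]
  | case2 a t ih =>
    intro hs n
    have htail : t.Pairwise (· ≤ ·) := (List.pairwise_cons.mp hs).2
    have hle : ∀ x ∈ t, a ≤ x := (List.pairwise_cons.mp hs).1
    have hr : (t.dropWhile (· == a)).Pairwise (· ≤ ·) :=
      htail.sublist (List.dropWhile_sublist _)
    -- a does not occur in the dropped suffix
    have hna : a ∉ t.dropWhile (· == a) := by
      clear ih hs hr
      induction t with
      | nil => simp
      | cons b t' ih' =>
        by_cases hb : (b == a) = true
        · rw [List.dropWhile_cons, if_pos hb]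
          exact ih' (List.pairwise_cons.mp htail).2 (fun x hx => hle x (List.mem_cons_of_mem _ hx))
        · rw [List.dropWhile_cons, if_neg hb]
          intro hmem
          rcases List.mem_cons.mp hmem with h | h
          · exact hb (by simp [h.symm])
          · have h1 : b ≤ a := (List.pairwise_cons.mp htail).1 a h
            have h2 : a ≤ b := hle b List.mem_cons_self
            exact hb (by simp [le_antisymm h1 h2])
    have hsplit : t.takeWhile (· == a) ++ t.dropWhile (· == a) = t :=
      List.takeWhile_append_dropWhile
    have hpall : ∀ x ∈ t.takeWhile (· == a), x = a := by
      intro x hx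
      simpa using List.mem_takeWhile_imp hx
    -- count of a in the whole list
    have hcount_a : (a :: t).count a = (t.takeWhile (· == a)).length + 1 := by
      rw [List.count_cons_self]
      have ht : t.count a = (t.takeWhile (· == a)).count a + (t.dropWhile (· == a)).count a := by
        conv_lhs => rw [← hsplit]
        rw [List.count_append]
      have h1 : (t.takeWhile (· == a)).count a = (t.takeWhile (· == a)).length :=
        List.count_eq_length.mpr (by intro b hb; simp [hpall b hb])
      have h2 : (t.dropWhile (· == a)).count a = 0 := List.count_eq_zero.mpr hna
      omega
    -- counts of suffix characters are unchanged
    have hcount_r : ∀ c ∈ t.dropWhile (· == a), (a :: t).count c = (t.dropWhile (· == a)).count c := by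
      intro c hc
      have hca : c ≠ a := fun h => hna (h ▸ hc)
      have ht : t.count c = (t.takeWhile (· == a)).count c + (t.dropWhile (· == a)).count c := by
        conv_lhs => rw [← hsplit]
        rw [List.count_append]
      have h0 : (t.takeWhile (· == a)).count c = 0 :=
        List.count_eq_zero.mpr (fun hcp => hca (hpall c hcp))
      simp [Ne.symm hca]
      omega
    rw [pvRuns]
    simp only [List.mem_cons]
    constructor
    · rintro (h | h)
      · exact ⟨a, Or.inl rfl, by rw [hcount_a]; push_cast [h]; ring⟩
      · obtain ⟨c, hc, hcn⟩ := (ih hr n).mp h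
        exact ⟨c, Or.inr ((List.dropWhile_sublist _).subset hc), by rw [hcount_r c hc]; exact hcn⟩
    · rintro ⟨c, hc | hc, hcn⟩
      · left; rw [hc, hcount_a] at hcn; push_cast at hcn ⊢; omega
      · rw [← hsplit] at hc
        rcases List.mem_append.mp hc with hcp | hcr
        · left
          rw [hpall c hcp, hcount_a] at hcn
          push_cast at hcn ⊢; omega
        · right
          exact (ih hr n).mpr ⟨c, hcr, by rw [← hcount_r c hcr]; exact hcn⟩

-- per-word agreement of the two programs
theorem pv_count_letter_eq (w : String) :
    count_letter w = (decide ((2 : Int) ∈ run_lengths w), decide ((3 : Int) ∈ run_lengths w)) := by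
  have hmem : ∀ n : Int, ((n ∈ run_lengths w) ↔ ∃ c ∈ w.toList, (w.toList.count c : Int) = n) := by
    intro n
    unfold run_lengths
    have hperm := PySem.List.sorted_perm w.toList (fun c => c) false
    rw [pv_runs_mem _ (by simpa using PySem.List.sorted_pairwise w.toList (fun c => c))]
    constructor
    · rintro ⟨c, hc, hcn⟩
      exact ⟨c, hperm.mem_iff.mp hc, by rw [← hperm.count_eq]; exact hcn⟩
    · rintro ⟨c, hc, hcn⟩
      exact ⟨c, hperm.mem_iff.mpr hc, by rw [hperm.count_eq]; exact hcn⟩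
  unfold count_letter
  rw [pv_counter_eq, pv_flag_fold, PySem.Dict.keys_counter]
  have hany : ∀ n : Int, (PySem.Set.ofList w.toList).any
      (fun k => (PySem.Dict.counter w.toList).getD k 0 == n)
      = decide (∃ c ∈ w.toList, (w.toList.count c : Int) = n) := by
    intro n
    rw [Bool.eq_iff_iff]
    simp [List.any_eq_true, PySem.Set.mem_ofList, PySem.Dict.getD_counter]
  simp only [Bool.false_or, hany, hmem]

-- ===== VERDICT (by name: the statement is the Claim_ definition above) =====
theorem calculate_doubles_and_triples_spec : Claim_equal_calculate_doubles_and_triples := by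
  intro words _
  show calculate_doubles_and_triples words = calculate_doubles_and_triples_alt words
  unfold calculate_doubles_and_triples calculate_doubles_and_triples_alt
  congr 1
  funext p e
  rw [pv_count_letter_eq]
  simp
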